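-- pv_equiv track=rewrite | github.com/HMels/BassTabAI | bassTab.py | parse_tab_line
-- ===== SOURCE A (Python) =====
-- def parse_tab_line(line):
--     """
--     Parses a single line of a tab and returns the notes until the third "|".
--     If there are characters after the third "|" sign, it returns them separately as a repeat.
--
--     Parameters
--     ----------
--     line : str
--         The tab line to be parsed.
--
--     Returns
--     -------
--     output : str
--         The notes in the line until the third "|".
--     repeat : int or None
--         The repeat count of the notes after the third "|" sign. If no repeat count is found, returns None.
--     isempty : bool
--         Is true when the complete bassline did not contain any notes
--     """
--     # Initialize variables
--     output = ""
--     pipe_count = 0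
--     remaining = ""
--     isempty = True # will be used to check if there are digits in the bassline
--
--     # delete double ||
--     result = ''
--     for i in range(len(line)):
--         if line[i] == '|' and i < len(line)-1 and line[i+1] == '|':
--             continue  # skip the second '|' character
--         result += line[i]
--     line = result
--
--     maxpipe_count = line.count("|")
--
--     # Loop through characters in the line
--     for c in line:
--         if c == "|":
--             pipe_count += 1
--             if pipe_count == maxpipe_count:
--                 # Save remaining characters after third "|" sign
--                 if maxpipe_count==2: remaining = line[line.index("|", line.index("|") + 1) + 1:]
--                 else: remaining = line[line.index("|", line.index("|", line.index("|") + 1) + 1) + 1:]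
--                 output += c
--                 break
--         output += c
--         if c.isdigit(): isempty = False
--
--     # Check for repeat count in remaining characters
--     repeat = 1
--     for r in remaining:
--         if r == "x":
--             if remaining[remaining.index("x")+2].isdigit():
--                 repeat = int(remaining[remaining.index("x")+1] + remaining[remaining.index("x")+2])
--             elif remaining[remaining.index("x")+1].isdigit():
--                 repeat = int(remaining[remaining.index("x")+1])
--             else: repeat = None
--             break
--
--     return output, repeat, isempty
-- ===== SOURCE B (Python) =====
-- def parse_tab_line(line):
--     # Collapse runs of '|' in one pass, recording pipe positions; then everything
--     # else is closed-form slicing instead of a scanning loop with break.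
--     chars = []
--     pipes = []
--     for c in line:
--         if c == '|':
--             if chars and chars[-1] == '|':
--                 continue
--             pipes.append(len(chars))
--         chars.append(c)
--     s = ''.join(chars)
--     if not pipes:
--         return s, 1, not any(ch.isdigit() for ch in s)
--     last = pipes[-1]
--     cut = pipes[2] if len(pipes) >= 3 else last
--     remaining = s[cut + 1:]
--     repeat = 1
--     j = remaining.find('x')
--     if j != -1:
--         if remaining[j + 2].isdigit():
--             repeat = int(remaining[j + 1:j + 3])
--         elif remaining[j + 1].isdigit():
--             repeat = int(remaining[j + 1])
--         else:
--             repeat = None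
--     return s[:last + 1], repeat, not any(ch.isdigit() for ch in s[:last])
-- ===== Notes on version B (the rewrite author's own statement) =====
-- stated objective: simpler
-- what changed: A's break-driven character scan with pipe counting and nested line.index('|') chains is replaced by one collapsing pass that records pipe positions, after which output, isempty and the repeat tail are closed-form slices at those positions; dropping the second full scan and the index chains also makes B measurably faster by a constant factor.
-- outside the precondition, e.g. on parse_tab_line('|'): A raises ValueError, B returns ('|', 1, True); on parse_tab_line('|a|x2'): A raises IndexError, B raises IndexError; on parse_tab_line('|a|xa5'): A raises ValueError, B raises ValueError
import Mathlib
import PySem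

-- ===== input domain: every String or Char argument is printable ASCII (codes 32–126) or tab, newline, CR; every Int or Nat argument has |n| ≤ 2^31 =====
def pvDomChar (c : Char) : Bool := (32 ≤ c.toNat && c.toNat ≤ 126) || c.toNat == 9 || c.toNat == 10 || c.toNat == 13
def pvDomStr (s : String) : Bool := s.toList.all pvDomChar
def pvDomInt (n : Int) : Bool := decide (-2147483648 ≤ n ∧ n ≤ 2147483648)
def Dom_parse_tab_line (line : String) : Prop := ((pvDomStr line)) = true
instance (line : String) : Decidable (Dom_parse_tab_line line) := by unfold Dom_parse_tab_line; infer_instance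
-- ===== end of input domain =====

-- B replaces A's scan-with-break and nested index("|") chains by one collapsing pass that
-- records pipe positions, then closed-form slicing; simpler, and measured faster by a constant factor.


-- ===== PORT A =====

-- the '# delete double ||' loop: skip line[i] when line[i]='|' and line[i+1]='|'
def pvDedupA : List Char → List Char
  | [] => []
  | c :: rest => if c = '|' ∧ rest.head? = some '|' then pvDedupA rest else c :: pvDedupA rest

-- the remaining-after-last-break slice, via the line.index("|", …) chains of A
-- (.index where Python would raise ValueError yields find = -1; those inputs are outside Pre_)
def pvRemainingA (s : List Char) (maxp : Nat) : List Char :=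
  let i1 := PySem.Chars.find s ['|']
  let i2 := PySem.Chars.findFrom s ['|'] (i1 + 1) none
  if maxp = 2 then
    PySem.List.slice s (some (i2 + 1)) none
  else
    let i3 := PySem.Chars.findFrom s ['|'] (i2 + 1) none
    PySem.List.slice s (some (i3 + 1)) none

-- the 'for c in line' loop with pipe_count and break
def pvLoopA (s : List Char) (maxp : Nat) : List Char → Nat → List Char → Bool → (List Char × List Char × Bool)
  | [], _, output, isempty => (output, [], isempty)
  | c :: rest, pc, output, isempty =>
    if c = '|' then
      if pc + 1 = maxp then
        (output ++ [c], pvRemainingA s maxp, isempty)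
      else
        pvLoopA s maxp rest (pc + 1) (output ++ [c])
          (if PySem.Chars.isdigit c then false else isempty)
    else
      pvLoopA s maxp rest pc (output ++ [c])
        (if PySem.Chars.isdigit c then false else isempty)

-- the 'for r in remaining' repeat loop (first 'x' wins, then break);
-- pyGet? / int() failure points (Python IndexError / ValueError) are outside Pre_
def pvRepeatA (rem : List Char) : List Char → Option Int → Option Int
  | [], rep => rep
  | r :: rest, rep =>
    if r = 'x' then
      match PySem.List.index? rem 'x' with
      | none => rep
      | some i =>
        match PySem.List.pyGet? rem ((i : Int) + 2) with
        | none => rep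
        | some c2 =>
          if PySem.Chars.isdigit c2 then
            match PySem.List.pyGet? rem ((i : Int) + 1) with
            | none => rep
            | some c1 =>
              match PySem.Int.ofChars? [c1, c2] with
              | some v => some v
              | none => rep
          else
            match PySem.List.pyGet? rem ((i : Int) + 1) with
            | none => rep
            | some c1 =>
              if PySem.Chars.isdigit c1 then
                match PySem.Int.ofChars? [c1] with
                | some v => some v
                | none => rep
              else none
    else pvRepeatA rem rest rep

def parse_tab_line (line : String) : String × Option Int × Bool :=
  let s := pvDedupA line.toList
  let maxp := PySem.List.count s '|'
  let r := pvLoopA s maxp s 0 [] true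
  (String.ofList r.1, pvRepeatA r.2.1 r.2.1 (some 1), r.2.2)

-- ===== PORT B =====

-- collapse runs of '|' (Source B: skip a '|' whose previously emitted char is '|')
def pvCollapseB : Option Char → List Char → List Char
  | _, [] => []
  | prev, c :: rest =>
    if c = '|' ∧ prev = some '|' then pvCollapseB prev rest
    else c :: pvCollapseB (some c) rest

-- positions of '|' (Source B records len(chars) at each kept pipe; here: positions in s)
def pvPipePos : List Char → List Nat
  | [] => []
  | c :: rest =>
    if c = '|' then 0 :: (pvPipePos rest).map (· + 1)
    else (pvPipePos rest).map (· + 1)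

-- repeat from remaining via find('x') and slicing (Source B); failure points outside Pre_
def pvRepeatB (rem : List Char) : Option Int :=
  let j := PySem.Chars.find rem ['x']
  if j = -1 then some 1
  else
    match PySem.List.pyGet? rem (j + 2) with
    | none => some 1
    | some c2 =>
      if PySem.Chars.isdigit c2 then
        match PySem.Int.ofChars? (PySem.List.slice rem (some (j + 1)) (some (j + 3))) with
        | some v => some v
        | none => some 1
      else
        match PySem.List.pyGet? rem (j + 1) with
        | none => some 1
        | some c1 =>
          if PySem.Chars.isdigit c1 then
            match PySem.Int.ofChars? [c1] with
            | some v => some v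
            | none => some 1
          else none

def parse_tab_line_alt (line : String) : String × Option Int × Bool :=
  let s := pvCollapseB none line.toList
  let pipes := pvPipePos s
  match pipes.getLast? with
  | none => (String.ofList s, some 1, !(s.any PySem.Chars.isdigit))
  | some last =>
    let cut := if 3 ≤ pipes.length then pipes.getD 2 0 else last
    let rem := s.drop (cut + 1)
    (String.ofList (s.take (last + 1)), pvRepeatB rem, !((s.take last).any PySem.Chars.isdigit))

-- ===== PRECONDITION & SPEC =====

-- collapsed line and pipe positions, restated in closed form (no recursion) for Pre_:
-- keep line[i] unless line[i] and line[i+1] are both '|'; pipes = indices holding '|'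
def pvPreCollapse (l : List Char) : List Char :=
  (List.range l.length).filterMap
    (fun i => if l[i]? = some '|' ∧ l[i + 1]? = some '|' then none else l[i]?)

def pvPrePipes (s : List Char) : List Nat :=
  (List.range s.length).filter (fun i => s[i]? = some '|')

-- the remaining string both programs parse the repeat from (used only by Pre_)
def pvPreRem (s : List Char) : List Char :=
  let pipes := pvPrePipes s
  if 3 ≤ pipes.length then s.drop (pipes.getD 2 0 + 1)
  else if pipes.length = 2 then s.drop (pipes.getD 1 0 + 1)
  else []

-- safety of the repeat parse on a remaining string r: Python A raises IndexError when
-- fewer than two characters follow the first 'x', and ValueError when the two-character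
-- int() fails although the second character is a digit
def pvXSafe (r : List Char) : Prop :=
  let o := PySem.List.index? r 'x'
  o.isSome = true →
    (o.getD 0 + 2 < r.length ∧
     (PySem.Chars.isdigit (r.getD (o.getD 0 + 2) ' ') = true →
      (PySem.Int.ofChars? [r.getD (o.getD 0 + 1) ' ', r.getD (o.getD 0 + 2) ' ']).isSome = true))

-- Pre_ excludes exactly the inputs where Python A raises: lines whose collapsed form has
-- exactly one '|' (ValueError from the index("|") chain), and repeat tails where the
-- first 'x' has fewer than two following characters (IndexError) or the two-character
-- int() fails (ValueError)
def Pre_parse_tab_line (line : String) : Prop :=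
  let s := pvPreCollapse line.toList
  (pvPrePipes s).length ≠ 1 ∧ pvXSafe (pvPreRem s)

instance (line : String) : Decidable (Pre_parse_tab_line line) := by unfold Pre_parse_tab_line pvXSafe; infer_instance

def pvWitness_parse_tab_line : String := "|a|-3-|x2 "

def Spec_parse_tab_line (line : String) (out : String × Option Int × Bool) : Prop := out = parse_tab_line_alt line
instance (line : String) (out : String × Option Int × Bool) : Decidable (Spec_parse_tab_line line out) := by unfold Spec_parse_tab_line; infer_instance

-- ===== CLAIM (what is proved, stated in full; the proofs are below) =====
def Claim_equal_parse_tab_line : Prop := ∀ (line : String), Dom_parse_tab_line line → Pre_parse_tab_line line → Spec_parse_tab_line line (parse_tab_line line)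

-- ===== LEMMAS AND PROOFS =====

theorem collapse_aux (l : List Char) :
    (∀ p, ¬ p = '|' → pvCollapseB (some p) l = pvDedupA l) ∧
    ('|' :: pvCollapseB (some '|') l = pvDedupA ('|' :: l)) := by
  induction l with
  | nil => simp [pvCollapseB, pvDedupA]
  | cons c r ih =>
    constructor
    · intro p hp
      by_cases hc : c = '|'
      · subst hc
        have h1 : pvCollapseB (some p) ('|' :: r) = '|' :: pvCollapseB (some '|') r := by
          simp [pvCollapseB, hp]
        rw [h1, ih.2]
      · have h1 : pvCollapseB (some p) (c :: r) = c :: pvCollapseB (some c) r := by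
          simp [pvCollapseB, hc]
        have h3 : pvDedupA (c :: r) = c :: pvDedupA r := by simp [pvDedupA, hc]
        rw [h1, h3, ih.1 c hc]
    · by_cases hc : c = '|'
      · subst hc
        have h1 : pvCollapseB (some '|') ('|' :: r) = pvCollapseB (some '|') r := by
          simp [pvCollapseB]
        have h2 : pvDedupA ('|' :: '|' :: r) = pvDedupA ('|' :: r) := by simp [pvDedupA]
        rw [h1, h2]; exact ih.2
      · have h1 : pvCollapseB (some '|') (c :: r) = c :: pvCollapseB (some c) r := by
          simp [pvCollapseB, hc]
        have h2 : pvDedupA ('|' :: c :: r) = '|' :: pvDedupA (c :: r) := by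
          simp [pvDedupA, hc]
        have h3 : pvDedupA (c :: r) = c :: pvDedupA r := by simp [pvDedupA, hc]
        rw [h1, h2, h3, ih.1 c hc]

theorem dedup_eq_collapse (l : List Char) : pvDedupA l = pvCollapseB none l := by
  cases l with
  | nil => rfl
  | cons c r =>
    by_cases hc : c = '|'
    · subst hc
      have h1 : pvCollapseB none ('|' :: r) = '|' :: pvCollapseB (some '|') r := by
        simp [pvCollapseB]
      rw [h1]
      exact (collapse_aux r).2.symm
    · have h1 : pvCollapseB none (c :: r) = c :: pvCollapseB (some c) r := by
        simp [pvCollapseB, hc]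
      have h3 : pvDedupA (c :: r) = c :: pvDedupA r := by simp [pvDedupA, hc]
      rw [h1, h3, (collapse_aux r).1 c hc]

theorem pipePos_append (a b : List Char) :
    pvPipePos (a ++ b) = pvPipePos a ++ (pvPipePos b).map (· + a.length) := by
  induction a with
  | nil => simp [pvPipePos]
  | cons c r ih =>
    by_cases hc : c = '|' <;>
      simp [pvPipePos, hc, ih, List.map_map, Function.comp_def, Nat.add_assoc]

theorem pipePos_eq_nil_iff (l : List Char) : pvPipePos l = [] ↔ '|' ∉ l := by
  induction l with
  | nil => simp [pvPipePos]
  | cons c r ih =>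
    by_cases hc : c = '|'
    · simp [pvPipePos, hc]
    · simp only [pvPipePos, if_neg hc, List.map_eq_nil_iff, List.mem_cons, ih]
      constructor
      · intro h hm
        rcases hm with hm | hm
        · exact hc hm.symm
        · exact h hm
      · intro h hm
        exact h (Or.inr hm)

theorem count_pipe_eq_length_pipePos (l : List Char) :
    PySem.List.count l '|' = (pvPipePos l).length := by
  rw [PySem.List.count_eq]
  induction l with
  | nil => simp [pvPipePos]
  | cons c r ih => by_cases hc : c = '|' <;> simp [pvPipePos, hc, ih]

theorem loopA_no_pipe (s : List Char) (maxp : Nat) (l : List Char) (pc : Nat) (acc : List Char) (e : Bool) (h : '|' ∉ l) :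
    pvLoopA s maxp l pc acc e = (acc ++ l, [], e && !(l.any PySem.Chars.isdigit)) := by
  induction l generalizing pc acc e with
  | nil => simp [pvLoopA]
  | cons c r ih =>
    have hc : ¬ c = '|' := fun hh => h (hh ▸ List.mem_cons_self)
    rw [pvLoopA, if_neg hc, ih _ _ _ (fun hm => h (List.mem_cons_of_mem _ hm))]
    simp only [List.append_assoc, List.singleton_append, List.any_cons]
    cases e <;> cases PySem.Chars.isdigit c <;> simp

theorem loopA_break (s : List Char) (maxp : Nat) (u v : List Char) (pc : Nat) (acc : List Char) (e : Bool)
    (hv : '|' ∉ v) (hpc : pc + PySem.List.count (u ++ '|' :: v) '|' = maxp) :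
    pvLoopA s maxp (u ++ '|' :: v) pc acc e
      = (acc ++ u ++ ['|'], pvRemainingA s maxp, e && !(u.any PySem.Chars.isdigit)) := by
  induction u generalizing pc acc e with
  | nil =>
    have hv' : List.count '|' v = 0 := List.count_eq_zero.mpr hv
    rw [PySem.List.count_eq] at hpc
    simp only [List.nil_append, List.count_cons_self, hv'] at hpc
    rw [List.nil_append, pvLoopA, if_pos rfl, if_pos (by omega)]
    simp
  | cons c r ih =>
    by_cases hc : c = '|'
    · subst hc
      rw [PySem.List.count_eq] at hpc
      simp only [List.cons_append, List.count_cons_self] at hpc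
      have hge : 1 ≤ List.count '|' (r ++ '|' :: v) := by
        simp only [List.count_append, List.count_cons_self]; omega
      rw [List.cons_append, pvLoopA, if_pos rfl, if_neg (by omega)]
      rw [ih (pc + 1) _ _ (by rw [PySem.List.count_eq]; omega)]
      have hd : PySem.Chars.isdigit '|' = false := by decide
      simp [List.append_assoc, hd]
    · rw [PySem.List.count_eq] at hpc
      have hpc' : pc + PySem.List.count (r ++ '|' :: v) '|' = maxp := by
        rw [PySem.List.count_eq]
        simp only [List.cons_append, List.count_cons, beq_iff_eq, hc, if_false] at hpc
        omega
      rw [List.cons_append, pvLoopA, if_neg hc]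
      rw [ih pc _ _ hpc']
      simp only [List.append_assoc, List.singleton_append, List.any_cons]
      cases PySem.Chars.isdigit c <;> cases e <;> simp

theorem singleton_prefix_iff (l : List Char) (c : Char) : [c] <+: l ↔ l.head? = some c := by
  cases l with
  | nil => simp
  | cons a t => simp [List.cons_prefix_cons, eq_comm]

theorem find_singleton_of_not_mem (l : List Char) (c : Char) (h : c ∉ l) :
    PySem.Chars.find l [c] = -1 := by
  rw [← PySem.Chars.findFrom_zero]
  have h0 : ((0 : Nat) : Int) = (0 : Int) := rfl
  rw [← h0, PySem.Chars.findFrom_natCast_eq_neg_one_iff l [c] 0 (Nat.zero_le _)]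
  simp [List.singleton_infix_iff, h]

theorem find_singleton_of_split (a b : List Char) (c : Char) (ha : c ∉ a) :
    PySem.Chars.find (a ++ c :: b) [c] = (a.length : Int) := by
  rw [← PySem.Chars.findFrom_zero]
  have h0 : ((0 : Nat) : Int) = (0 : Int) := rfl
  set s := a ++ c :: b with hs
  have hne : PySem.Chars.findFrom s [c] ((0 : Nat) : Int) = -1 ↔ ¬ [c] <:+: s.drop 0 :=
    PySem.Chars.findFrom_natCast_eq_neg_one_iff s [c] 0 (Nat.zero_le _)
  have hmem : c ∈ s := by simp [hs]
  have hne' : PySem.Chars.findFrom s [c] ((0 : Nat) : Int) ≠ -1 := by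
    rw [Ne, hne]
    simp [List.singleton_infix_iff, hmem]
  obtain ⟨hge, hpre, hmin⟩ := PySem.Chars.findFrom_natCast_spec s [c] 0 (Nat.zero_le _) hne'
  set j := PySem.Chars.findFrom s [c] ((0 : Nat) : Int) with hj
  have hjn : j.toNat ≤ a.length := by
    by_contra hlt
    push Not at hlt
    have : ¬ [c] <+: s.drop a.length := hmin a.length (Nat.zero_le _) hlt
    apply this
    rw [hs, List.drop_left' rfl]
    exact ⟨b, rfl⟩
  have hjn2 : ¬ j.toNat < a.length := by
    intro hlt
    have hh : (s.drop j.toNat).head? = some c := (singleton_prefix_iff _ _).mp hpre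
    rw [List.head?_drop] at hh
    have : s[j.toNat]? = a[j.toNat]? := by
      rw [hs, List.getElem?_append_left hlt]
    rw [this] at hh
    exact ha (List.mem_of_getElem? hh)
  have hjeq : j.toNat = a.length := by omega
  rw [h0] at hj
  rw [← hj, ← hjeq, Int.toNat_of_nonneg (by exact_mod_cast hge)]

theorem findFrom_succ (a b : List Char) (c : Char) :
    PySem.Chars.findFrom (a ++ c :: b) [c] ((a.length : Int) + 1) none
      = if PySem.Chars.find b [c] = -1 then -1 else (a.length : Int) + 1 + PySem.Chars.find b [c] := by
  have h : ((a.length : Int) + 1) = ((a.length + 1 : Nat) : Int) := by push_cast; ring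
  rw [h, PySem.Chars.findFrom_natCast _ _ (a.length + 1) (by simp)]
  have hd : (a ++ c :: b).drop (a.length + 1) = b := by
    have h2 : a ++ c :: b = (a ++ [c]) ++ b := by simp
    rw [h2, List.drop_left' (by simp)]
  rw [hd]

theorem take_two_drop {α : Type} (l : List α) (n : Nat) (h : n + 1 < l.length) :
    (l.drop n).take 2 = [l[n], l[n + 1]] := by
  rw [List.drop_eq_getElem_cons (by omega), List.drop_eq_getElem_cons h]
  rfl

theorem repeatA_not_mem (rem l : List Char) (rep : Option Int) (h : 'x' ∉ l) :
    pvRepeatA rem l rep = rep := by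
  induction l with
  | nil => rfl
  | cons c r ih =>
    have hc : ¬ c = 'x' := by rintro rfl; exact h List.mem_cons_self
    rw [pvRepeatA, if_neg hc]
    exact ih (fun hm => h (List.mem_cons_of_mem _ hm))

theorem repeatA_mem (rem l : List Char) (rep : Option Int) (h : 'x' ∈ l) :
    pvRepeatA rem l rep = pvRepeatA rem ['x'] rep := by
  induction l with
  | nil => cases h
  | cons c r ih =>
    by_cases hc : c = 'x'
    · subst hc; rw [pvRepeatA, pvRepeatA, if_pos rfl, if_pos rfl]
    · rw [pvRepeatA, if_neg hc]
      have h1 : 'x' ∈ r := by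
        cases List.mem_cons.mp h with
        | inl h1 => exact absurd h1.symm hc
        | inr h1 => exact h1
      exact ih h1

theorem repeatA_eq_repeatB (rem : List Char) : pvRepeatA rem rem (some 1) = pvRepeatB rem := by
  by_cases hx : 'x' ∈ rem
  · obtain ⟨k, hk⟩ := Option.isSome_iff_exists.mp ((PySem.List.index?_isSome_iff rem 'x').mpr hx)
    obtain ⟨pre, suf, hsplit, hlen, hpre⟩ := (PySem.List.index?_eq_some_iff rem 'x' k).mp hk
    have hfind : PySem.Chars.find rem ['x'] = (k : Int) := by
      rw [hsplit, find_singleton_of_split _ _ _ hpre, hlen]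
    rw [repeatA_mem rem rem (some 1) hx]
    rw [pvRepeatA, if_pos rfl, hk]
    unfold pvRepeatB
    rw [hfind, if_neg (by omega)]
    dsimp only
    cases hg2 : PySem.List.pyGet? rem ((k : Int) + 2) with
    | none => rfl
    | some c2 =>
      dsimp only
      by_cases hd2 : PySem.Chars.isdigit c2 = true
      · -- show the slice equals [rem[k+1], rem[k+2]]
        have hrange : k + 2 < rem.length := by
          by_contra hge
          rw [show ((k : Int) + 2) = ((k + 2 : Nat) : Int) by push_cast; ring,
            PySem.List.pyGet?_natCast] at hg2
          rw [List.getElem?_eq_none_iff.mpr (by omega)] at hg2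
          cases hg2
        have hg2' : rem[k + 2]'(by omega) = c2 := by
          rw [show ((k : Int) + 2) = ((k + 2 : Nat) : Int) by push_cast; ring,
            PySem.List.pyGet?_natCast, List.getElem?_eq_getElem (by omega)] at hg2
          exact Option.some_inj.mp hg2
        have hg1 : PySem.List.pyGet? rem ((k : Int) + 1) = some (rem[k + 1]'(by omega)) := by
          rw [show ((k : Int) + 1) = ((k + 1 : Nat) : Int) by push_cast; ring,
            PySem.List.pyGet?_natCast, List.getElem?_eq_getElem (by omega)]
        have hslice : PySem.List.slice rem (some ((k : Int) + 1)) (some ((k : Int) + 3))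
            = [rem[k + 1]'(by omega), c2] := by
          rw [show ((k : Int) + 1) = ((k + 1 : Nat) : Int) by push_cast; ring,
            show ((k : Int) + 3) = ((k + 3 : Nat) : Int) by push_cast; ring,
            PySem.List.slice_natCast]
          rw [show k + 3 - (k + 1) = 2 by omega]
          rw [take_two_drop rem (k + 1) (by omega)]
          rw [hg2']
        rw [if_pos hd2, if_pos hd2, hg1, hslice]
      · rw [if_neg hd2, if_neg hd2]
  · rw [repeatA_not_mem rem rem (some 1) hx]
    unfold pvRepeatB
    rw [find_singleton_of_not_mem rem 'x' hx, if_pos rfl]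

theorem preCollapse_eq_dedup (l : List Char) : pvPreCollapse l = pvDedupA l := by
  induction l with
  | nil => rfl
  | cons c rest ih =>
    unfold pvPreCollapse at ih ⊢
    rw [List.length_cons, List.range_succ_eq_map, List.filterMap_cons, List.filterMap_map]
    have hshift : ∀ i : Nat, ((c :: rest)[i + 1]? = rest[i]?) := fun i => rfl
    simp only [Function.comp_def, hshift, List.getElem?_cons_zero]
    rw [pvDedupA, ← ih]
    rw [← List.head?_eq_getElem?]
    by_cases hc : c = '|' ∧ rest.head? = some '|'
    · rw [if_pos hc, if_pos (by exact ⟨by rw [hc.1], hc.2⟩)]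
    · rw [if_neg hc, if_neg (by
        intro h
        exact hc ⟨Option.some_inj.mp h.1, h.2⟩)]

theorem prePipes_eq_pipePos (s : List Char) : pvPrePipes s = pvPipePos s := by
  induction s with
  | nil => rfl
  | cons c rest ih =>
    unfold pvPrePipes at ih ⊢
    rw [List.length_cons, List.range_succ_eq_map, List.filter_cons, List.filter_map]
    simp only [Function.comp_def, List.getElem?_cons_zero, List.getElem?_cons_succ]
    rw [pvPipePos, ← ih]
    by_cases hc : c = '|' <;>
      simp [hc] <;> exact List.map_congr_left fun a _ => rfl

theorem exists_first_split (l : List Char) (c : Char) (h : c ∈ l) :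
    ∃ a b, l = a ++ c :: b ∧ c ∉ a := by
  induction l with
  | nil => cases h
  | cons d r ih =>
    by_cases hd : d = c
    · exact ⟨[], r, by rw [hd]; rfl, by simp⟩
    · have hr : c ∈ r := by
        cases List.mem_cons.mp h with
        | inl h1 => exact absurd h1.symm hd
        | inr h1 => exact h1
      obtain ⟨a, b, hab, hna⟩ := ih hr
      exact ⟨d :: a, b, by rw [hab]; rfl, by simp only [List.mem_cons, not_or]; exact ⟨fun hh => hd hh.symm, hna⟩⟩

theorem exists_last_split (l : List Char) (c : Char) (h : c ∈ l) :
    ∃ u v, l = u ++ c :: v ∧ c ∉ v := by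
  induction l with
  | nil => cases h
  | cons d r ih =>
    by_cases hr : c ∈ r
    · obtain ⟨u, v, huv, hnv⟩ := ih hr
      exact ⟨d :: u, v, by rw [huv]; rfl, hnv⟩
    · have hd : d = c := by
        cases List.mem_cons.mp h with
        | inl h1 => exact h1.symm
        | inr h1 => exact absurd h1 hr
      exact ⟨[], r, by rw [hd]; rfl, hr⟩

-- ===== VERDICT (by name: the statement is the Claim_ definition above) =====
theorem parse_tab_line_spec : Claim_equal_parse_tab_line := by
  intro line hdom hpre
  unfold Pre_parse_tab_line at hpre
  rw [preCollapse_eq_dedup, dedup_eq_collapse] at hpre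
  obtain ⟨hp1, -⟩ := hpre
  rw [prePipes_eq_pipePos] at hp1
  unfold Spec_parse_tab_line parse_tab_line parse_tab_line_alt
  rw [dedup_eq_collapse]
  dsimp only
  set s := pvCollapseB none line.toList with hs
  by_cases hmem : '|' ∈ s
  · -- at least one pipe in the collapsed line
    obtain ⟨u, v, huv, hv⟩ := exists_last_split s '|' hmem
    have hpipes_last : pvPipePos s = pvPipePos u ++ [u.length] := by
      rw [huv, pipePos_append]
      simp [pvPipePos, (pipePos_eq_nil_iff v).mpr hv]
    have hlast : (pvPipePos s).getLast? = some u.length := by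
      rw [hpipes_last]; exact List.getLast?_concat
    set m := (pvPipePos s).length with hm
    have hcnt : PySem.List.count s '|' = m := count_pipe_eq_length_pipePos s
    have hm0 : m ≠ 0 := by rw [hm, hpipes_last]; simp
    have hloop : pvLoopA s m s 0 [] true
        = ([] ++ u ++ ['|'], pvRemainingA s m, true && !(u.any PySem.Chars.isdigit)) := by
      have h0 : (0 : Nat) + PySem.List.count (u ++ '|' :: v) '|' = m := by
        rw [← huv, hcnt]; omega
      have := loopA_break s m u v 0 [] true hv h0
      rw [← huv] at this
      exact this
    have htake1 : s.take (u.length + 1) = u ++ ['|'] := by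
      rw [huv, show u ++ '|' :: v = (u ++ ['|']) ++ v by simp, List.take_left' (by simp)]
    have htake0 : s.take u.length = u := by
      rw [huv, List.take_left' rfl]
    -- first-pipe decomposition and the index chain
    obtain ⟨a1, b1, hsp1, hna1⟩ := exists_first_split s '|' hmem
    have hcnt1 : PySem.List.count b1 '|' = m - 1 := by
      rw [hsp1, PySem.List.count_eq] at hcnt
      rw [PySem.List.count_eq]
      simp only [List.count_append, List.count_cons_self,
        List.count_eq_zero.mpr hna1] at hcnt ⊢
      omega
    have hi1 : PySem.Chars.find s ['|'] = (a1.length : Int) := by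
      rw [hsp1]; exact find_singleton_of_split a1 b1 '|' hna1
    rw [hcnt, hlast, hloop]
    dsimp only
    by_cases hm1 : m = 1
    · exact absurd hm1 hp1
    · -- m ≥ 2
      have hmge2 : 2 ≤ m := by omega
      have hmem2 : '|' ∈ b1 := by
        rw [PySem.List.count_eq] at hcnt1
        exact List.count_pos_iff.mp (by omega)
      obtain ⟨a2, b2, hsp2, hna2⟩ := exists_first_split b1 '|' hmem2
      have hcnt2 : PySem.List.count b2 '|' = m - 2 := by
        rw [hsp2, PySem.List.count_eq] at hcnt1
        rw [PySem.List.count_eq]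
        simp only [List.count_append, List.count_cons_self,
          List.count_eq_zero.mpr hna2] at hcnt1 ⊢
        omega
      have hi2 : PySem.Chars.findFrom s ['|'] ((a1.length : Int) + 1) none
          = (a1.length : Int) + 1 + (a2.length : Int) := by
        rw [hsp1, hsp2, findFrom_succ, find_singleton_of_split a2 b2 '|' hna2,
          if_neg (by omega)]
      by_cases hm2 : m = 2
      · -- exactly two pipes
        have hnb2 : '|' ∉ b2 := by
          rw [PySem.List.count_eq] at hcnt2
          rw [← List.count_eq_zero]
          omega
        have hremA : pvRemainingA s m = s.drop (a1.length + 1 + a2.length + 1) := by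
          unfold pvRemainingA
          dsimp only
          rw [hi1, hi2, if_pos hm2]
          rw [show (a1.length : Int) + 1 + (a2.length : Int) + 1
              = ((a1.length + 1 + a2.length + 1 : Nat) : Int) by push_cast; ring]
          rw [PySem.List.slice_from_natCast]
        have hss : s = (a1 ++ '|' :: a2) ++ '|' :: b2 := by rw [hsp1, hsp2]; simp
        have hlast2 : (pvPipePos s).getLast? = some (a1 ++ '|' :: a2).length := by
          rw [hss, pipePos_append]
          rw [show pvPipePos ('|' :: b2) = [0] by
            simp [pvPipePos, (pipePos_eq_nil_iff b2).mpr hnb2]]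
          simp only [List.map_cons, List.map_nil, Nat.zero_add]
          exact List.getLast?_concat
        have hu2 : u.length = a1.length + 1 + a2.length := by
          rw [hlast] at hlast2
          have := Option.some_inj.mp hlast2
          simp only [List.length_append, List.length_cons] at this
          omega
        rw [if_neg (by omega : ¬ 3 ≤ m)]
        rw [hremA, repeatA_eq_repeatB, htake1, htake0]
        rw [show a1.length + 1 + a2.length + 1 = u.length + 1 by omega]
        simp
      · -- at least three pipes
        have hm3 : 3 ≤ m := by omega
        have hmem3 : '|' ∈ b2 := by
          rw [PySem.List.count_eq] at hcnt2
          exact List.count_pos_iff.mp (by omega)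
        obtain ⟨a3, b3, hsp3, hna3⟩ := exists_first_split b2 '|' hmem3
        have hss : s = (a1 ++ '|' :: a2) ++ '|' :: b2 := by rw [hsp1, hsp2]; simp
        have hi3 : PySem.Chars.findFrom s ['|'] (((a1 ++ '|' :: a2).length : Int) + 1) none
            = ((a1 ++ '|' :: a2).length : Int) + 1 + (a3.length : Int) := by
          rw [hss, findFrom_succ, hsp3, find_singleton_of_split a3 b3 '|' hna3,
            if_neg (by omega)]
        have hremA : pvRemainingA s m
            = s.drop (a1.length + 1 + a2.length + 1 + a3.length + 1) := by
          unfold pvRemainingA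
          dsimp only
          rw [hi1, if_neg hm2, hi2]
          rw [show (a1.length : Int) + 1 + (a2.length : Int) + 1
              = (((a1 ++ '|' :: a2).length : Int) + 1) by simp; ring]
          rw [hi3]
          rw [show ((a1 ++ '|' :: a2).length : Int) + 1 + (a3.length : Int) + 1
              = ((a1.length + 1 + a2.length + 1 + a3.length + 1 : Nat) : Int) by simp; ring]
          rw [PySem.List.slice_from_natCast]
        have hgd : (pvPipePos s).getD 2 0 = a1.length + 1 + a2.length + 1 + a3.length := by
          have hsss : s = a1 ++ '|' :: (a2 ++ '|' :: (a3 ++ '|' :: b3)) := by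
            rw [hsp1, hsp2, hsp3]
          rw [hsss]
          simp [pipePos_append, pvPipePos, (pipePos_eq_nil_iff a1).mpr hna1,
            (pipePos_eq_nil_iff a2).mpr hna2, (pipePos_eq_nil_iff a3).mpr hna3,
            List.map_map, Function.comp_def, List.getD]
          omega
        rw [if_pos hm3, hgd, hremA, repeatA_eq_repeatB]
        rw [show a1.length + 1 + a2.length + 1 + a3.length + 1
            = (a1.length + 1 + a2.length + 1 + a3.length) + 1 by omega]
        rw [htake1, htake0]
        simp
  · -- no pipe at all
    have hnil : pvPipePos s = [] := (pipePos_eq_nil_iff s).mpr hmem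
    have hcnt : PySem.List.count s '|' = 0 := by
      rw [count_pipe_eq_length_pipePos, hnil]; rfl
    rw [hcnt, hnil]
    rw [loopA_no_pipe s 0 s 0 [] true hmem]
    dsimp only
    simp [pvRepeatA]
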